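-- pv_equiv track=rewrite | github.com/ChrisCantReid623/Codefolio | infographic.py | most_occurring_by_size
-- ===== SOURCE A (Python) =====
-- def most_occurring_by_size(word_count_dict):
--     """
--     This function measures the keys of a dictionary to determine which category it belongs (small,
--     medium, large). The corresponding value is that words frequency of appearance in the txt file.
--     The most frequently occurring word with the corresponding value of each category are assigned
--     as a tuple in the most_occurring dictionary by category.
--
--     Each tuple is iterated and used to concatenate to form a string that is passed back to main()
--     for graphic display.
--
--     ---Parameters---
--     word_count_dict: a dictionary containing unique words and their frequencies as key:value pairs
--     """
--     most_occurring = {'small': ('most occurring small', 0), 'medium': ('most occurring medium', 0),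
--                       'large': ('most occurring large', 0)}
--     for key, value in word_count_dict.items():
--         if len(key) <= 4:
--             if most_occurring['small'][1] < value:
--                 most_occurring['small'] = key, value
--         elif len(key) <= 7:
--             if most_occurring['medium'][1] < value:
--                 most_occurring['medium'] = key, value
--         elif len(key) >= 8:
--             if most_occurring['large'][1] < value:
--                 most_occurring['large'] = key, value
--
--     string = ''
--     for value in most_occurring.values():
--         word, count = value
--         string += word + ' (' + str(count) + 'x) '
--     return string
-- ===== SOURCE B (Python) =====
-- def most_occurring_by_size(word_count_dict):
--     """Staged-scan re-implementation: for each size category, first find the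
--     maximum positive count, then the first word attaining it (sentinel text
--     when no positive count exists)."""
--     result = ''
--     for label, pred in (('small', lambda n: n <= 4),
--                         ('medium', lambda n: 5 <= n <= 7),
--                         ('large', lambda n: n >= 8)):
--         m = 0
--         for w, c in word_count_dict.items():
--             if pred(len(w)) and c > m:
--                 m = c
--         if m > 0:
--             word = next(w for w, c in word_count_dict.items()
--                         if pred(len(w)) and c == m)
--         else:
--             word = 'most occurring ' + label
--         result += word + ' (' + str(m) + 'x) '
--     return result
-- ===== Notes on version B (the rewrite author's own statement) =====
-- stated objective: alternative
-- what changed: Instead of A's single pass keeping a running best (word,count) pair per category, B makes staged scans per category: one scan computes the maximum positive count, a second scan finds the first word attaining it, with the sentinel text used only when no positive count exists.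
import Mathlib
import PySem

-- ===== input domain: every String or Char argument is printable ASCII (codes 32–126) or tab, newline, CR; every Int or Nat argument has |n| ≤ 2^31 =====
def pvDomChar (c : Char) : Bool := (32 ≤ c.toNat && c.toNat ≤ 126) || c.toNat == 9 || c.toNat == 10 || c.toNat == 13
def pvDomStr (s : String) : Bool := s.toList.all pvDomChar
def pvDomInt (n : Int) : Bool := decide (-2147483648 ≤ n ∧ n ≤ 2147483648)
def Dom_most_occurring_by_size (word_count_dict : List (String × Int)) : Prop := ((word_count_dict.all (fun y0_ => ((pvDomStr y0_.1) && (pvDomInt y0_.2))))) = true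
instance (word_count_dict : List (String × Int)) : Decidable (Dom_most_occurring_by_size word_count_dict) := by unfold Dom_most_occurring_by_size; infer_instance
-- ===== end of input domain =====

-- B replaces A's single running-best-pair-per-category loop by staged per-category scans: max positive count first, then the first word attaining it (alternative decomposition, same cost).


-- ===== PORT A =====
-- A's loop body: three-way size branch, each keeping a running best under a strict-< guard.
def pvStepA (st : (String × Int) × (String × Int) × (String × Int)) (kv : String × Int) :
    (String × Int) × (String × Int) × (String × Int) :=
  if PySem.Str.len kv.1 ≤ 4 then
    (if st.1.2 < kv.2 then kv else st.1, st.2.1, st.2.2)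
  else if PySem.Str.len kv.1 ≤ 7 then
    (st.1, if st.2.1.2 < kv.2 then kv else st.2.1, st.2.2)
  else if 8 ≤ PySem.Str.len kv.1 then
    (st.1, st.2.1, if st.2.2.2 < kv.2 then kv else st.2.2)
  else st

-- the Python parameter is a dict: its items (insertion order, overwrite in place) are PySem.Dict.ofList
def most_occurring_by_size (word_count_dict : List (String × Int)) : String :=
  let st := ((PySem.Dict.ofList word_count_dict).items).foldl pvStepA
      (("most occurring small", 0), ("most occurring medium", 0), ("most occurring large", 0))
  [st.1, st.2.1, st.2.2].foldl
    (fun s wc => s ++ wc.1 ++ " (" ++ PySem.Int.toStr wc.2 ++ "x) ") ""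

-- ===== PORT B =====
-- B's fixed category table: label and length predicate
def pvCats : List (String × (Int → Bool)) :=
  [("small", fun n => n ≤ 4), ("medium", fun n => 5 ≤ n && n ≤ 7), ("large", fun n => 8 ≤ n)]

def most_occurring_by_size_alt (word_count_dict : List (String × Int)) : String :=
  let items := (PySem.Dict.ofList word_count_dict).items
  pvCats.foldl (fun result lp =>
    -- scan 1: maximum positive count within the category
    let m := items.foldl (fun acc kv => if lp.2 (PySem.Str.len kv.1) && acc < kv.2 then kv.2 else acc) 0
    -- scan 2: first word attaining it (next(...); found whenever 0 < m, so the getD default is unreachable)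
    let word := if 0 < m then
        ((items.find? (fun kv => lp.2 (PySem.Str.len kv.1) && kv.2 == m)).getD ("", 0)).1
      else "most occurring " ++ lp.1
    result ++ word ++ " (" ++ PySem.Int.toStr m ++ "x) ") ""

-- ===== PRECONDITION & SPEC =====
def Spec_most_occurring_by_size (word_count_dict : List (String × Int)) (out : String) : Prop := out = most_occurring_by_size_alt word_count_dict
instance (word_count_dict : List (String × Int)) (out : String) : Decidable (Spec_most_occurring_by_size word_count_dict out) := by unfold Spec_most_occurring_by_size; infer_instance

-- ===== CLAIM (what is proved, stated in full; the proofs are below) =====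
def Claim_equal_most_occurring_by_size : Prop := ∀ (word_count_dict : List (String × Int)), Dom_most_occurring_by_size word_count_dict → Spec_most_occurring_by_size word_count_dict (most_occurring_by_size word_count_dict)

-- ===== LEMMAS AND PROOFS =====

-- the running-best update A applies inside each branch
def pvUpd (b kv : String × Int) : String × Int := if b.2 < kv.2 then kv else b

def pvSmall (kv : String × Int) : Bool := PySem.Str.len kv.1 ≤ 4
def pvMed (kv : String × Int) : Bool := !(PySem.Str.len kv.1 ≤ 4) && PySem.Str.len kv.1 ≤ 7
def pvLarge (kv : String × Int) : Bool := !(PySem.Str.len kv.1 ≤ 4) && !(PySem.Str.len kv.1 ≤ 7)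

-- A's mixed fold splits into three per-category folds over the filtered lists
theorem pvA_split (items : List (String × Int)) :
    ∀ s m g, items.foldl pvStepA (s, m, g)
      = ((items.filter pvSmall).foldl pvUpd s,
         (items.filter pvMed).foldl pvUpd m,
         (items.filter pvLarge).foldl pvUpd g) := by
  induction items with
  | nil => intro s m g; rfl
  | cons x t ih =>
      intro s m g
      by_cases h1 : x.1.length ≤ 4
      · simp [List.foldl_cons, pvStepA, PySem.Str.len, h1, pvSmall, pvMed, pvLarge, ih, pvUpd]
      · by_cases h2 : x.1.length ≤ 7
        · simp [List.foldl_cons, pvStepA, PySem.Str.len, h1, h2, pvSmall, pvMed, pvLarge, ih, pvUpd]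
        · have h8 : 8 ≤ x.1.length := by omega
          simp [List.foldl_cons, pvStepA, PySem.Str.len, h1, h2, h8, pvSmall, pvMed, pvLarge, ih, pvUpd]

-- the running maximum B's first scan computes (over an already-filtered list)
def pvM (a : Int) (l : List (String × Int)) : Int :=
  l.foldl (fun acc kv => if acc < kv.2 then kv.2 else acc) a

theorem pvM_le : ∀ (l : List (String × Int)) (a : Int), a ≤ pvM a l := by
  intro l
  induction l with
  | nil => intro a; simp [pvM]
  | cons x t ih =>
      intro a
      simp only [pvM, List.foldl_cons]
      split
      · exact le_trans (by omega) (ih x.2)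
      · exact ih a

-- B's guarded scan over the full list is the plain scan over the filtered list
theorem pvM_guard (p : String × Int → Bool) (l : List (String × Int)) :
    ∀ a, l.foldl (fun acc kv => if p kv && acc < kv.2 then kv.2 else acc) a = pvM a (l.filter p) := by
  induction l with
  | nil => intro a; simp [pvM]
  | cons x t ih =>
      intro a
      by_cases hp : p x = true
      · rw [List.foldl_cons, List.filter_cons_of_pos hp]
        have hinit : (if (p x && decide (a < x.2)) = true then x.2 else a)
            = if a < x.2 then x.2 else a := by simp [hp]
        rw [hinit, ih]
        rfl
      · rw [List.foldl_cons, List.filter_cons_of_neg (by simpa using hp)]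
        have hinit : (if (p x && decide (a < x.2)) = true then x.2 else a) = a := by simp [hp]
        rw [hinit, ih]

-- B's guarded find? over the full list is the plain find? over the filtered list
theorem pvFind_guard (p q : String × Int → Bool) (l : List (String × Int)) :
    l.find? (fun kv => p kv && q kv) = (l.filter p).find? q := by
  induction l with
  | nil => rfl
  | cons x t ih =>
      by_cases hp : p x = true
      · by_cases hq : q x = true
        · rw [List.find?_cons_of_pos (by simp [hp, hq]), List.filter_cons_of_pos hp,
              List.find?_cons_of_pos hq]
        · rw [List.find?_cons_of_neg (by simp [hp, hq]), List.filter_cons_of_pos hp,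
              List.find?_cons_of_neg (by simpa using hq), ih]
      · rw [List.find?_cons_of_neg (by simp [hp]), List.filter_cons_of_neg (by simpa using hp), ih]

-- whenever the maximum exceeds the start value it is attained, so find? succeeds
theorem pvFindSome : ∀ (l : List (String × Int)) (a : Int), a < pvM a l →
    (l.find? (fun kv => kv.2 == pvM a l)).isSome := by
  intro l
  induction l with
  | nil => intro a h; simp [pvM] at h
  | cons x t ih =>
      intro a h
      have hM : pvM a (x :: t) = pvM (if a < x.2 then x.2 else a) t := rfl
      by_cases hx : a < x.2
      · rw [hM, if_pos hx] at h ⊢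
        by_cases he : x.2 = pvM x.2 t
        · have hfind : List.find? (fun kv : String × Int => kv.2 == pvM x.2 t) (x :: t) = some x :=
            List.find?_cons_of_pos (beq_iff_eq.mpr he)
          rw [hfind]
          rfl
        · have h2 : x.2 < pvM x.2 t := lt_of_le_of_ne (pvM_le t x.2) he
          rw [List.find?_cons_of_neg (by simp [he])]
          exact ih x.2 h2
      · rw [hM, if_neg hx] at h ⊢
        have hne : x.2 ≠ pvM a t := by omega
        rw [List.find?_cons_of_neg (by simp [hne])]
        exact ih a h

-- A's per-category running-best fold, characterised by B's max-then-first-find scheme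
theorem pvG : ∀ (l : List (String × Int)) (s : String) (a : Int),
    l.foldl pvUpd (s, a)
      = if a < pvM a l then (l.find? (fun kv => kv.2 == pvM a l)).getD ("", 0) else (s, a) := by
  intro l
  induction l with
  | nil => intro s a; simp [pvM]
  | cons x t ih =>
      intro s a
      have hM : pvM a (x :: t) = pvM (if a < x.2 then x.2 else a) t := rfl
      rw [hM]
      by_cases hx : a < x.2
      · rw [if_pos hx]
        have hstep : List.foldl pvUpd (s, a) (x :: t) = List.foldl pvUpd (x.1, x.2) t := by
          simp [List.foldl_cons, pvUpd, hx]
        rw [hstep, ih x.1 x.2]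
        have hle := pvM_le t x.2
        have ha : a < pvM x.2 t := by omega
        rw [if_pos ha]
        by_cases he : x.2 < pvM x.2 t
        · rw [if_pos he, List.find?_cons_of_neg (by simp; omega)]
        · rw [if_neg he]
          have heq : pvM x.2 t = x.2 := by omega
          rw [List.find?_cons_of_pos (by simp [heq])]
          rfl
      · rw [if_neg hx]
        have hstep : List.foldl pvUpd (s, a) (x :: t) = List.foldl pvUpd (s, a) t := by
          simp [List.foldl_cons, pvUpd, hx]
        rw [hstep, ih s a]
        by_cases hm : a < pvM a t
        · rw [if_pos hm, if_pos hm, List.find?_cons_of_neg (by simp; omega)]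
        · rw [if_neg hm, if_neg hm]

-- the word component of A's fold is B's find?-based word
theorem pvWord (l : List (String × Int)) (s : String) :
    (l.foldl pvUpd (s, 0)).1
      = if 0 < pvM 0 l then ((l.find? (fun kv => kv.2 == pvM 0 l)).getD ("", 0)).1 else s := by
  rw [pvG l s 0]
  by_cases h : (0:Int) < pvM 0 l
  · simp [h]
  · simp [h]

-- the count component of A's fold is B's maximum
theorem pvCount (l : List (String × Int)) (s : String) :
    (l.foldl pvUpd (s, 0)).2 = pvM 0 l := by
  rw [pvG l s 0]
  by_cases h : (0:Int) < pvM 0 l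
  · obtain ⟨kv, hkv⟩ := Option.isSome_iff_exists.mp (pvFindSome l 0 h)
    have h2 : kv.2 = pvM 0 l := by simpa using List.find?_some hkv
    simp [h, hkv, h2]
  · have h0 : pvM 0 l = 0 := by have := pvM_le l 0; omega
    simp [h0]

-- B's category predicates agree pointwise with A's branch conditions
theorem pvFilter_med (l : List (String × Int)) :
    l.filter (fun kv => 5 ≤ PySem.Str.len kv.1 && PySem.Str.len kv.1 ≤ 7) = l.filter pvMed := by
  apply List.filter_congr
  intro kv _
  rw [Bool.eq_iff_iff]
  simp only [pvMed, Bool.and_eq_true, decide_eq_true_eq, Bool.not_eq_eq_eq_not, Bool.not_true,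
    decide_eq_false_iff_not]
  omega

theorem pvFilter_large (l : List (String × Int)) :
    l.filter (fun kv => 8 ≤ PySem.Str.len kv.1) = l.filter pvLarge := by
  apply List.filter_congr
  intro kv _
  rw [Bool.eq_iff_iff]
  simp only [pvLarge, Bool.and_eq_true, decide_eq_true_eq, Bool.not_eq_eq_eq_not, Bool.not_true,
    decide_eq_false_iff_not]
  omega

-- ===== VERDICT (by name: the statement is the Claim_ definition above) =====
theorem most_occurring_by_size_spec : Claim_equal_most_occurring_by_size := by
  intro l _
  unfold Spec_most_occurring_by_size most_occurring_by_size most_occurring_by_size_alt pvCats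
  rw [pvA_split]
  simp only [List.foldl_cons, List.foldl_nil]
  rw [pvM_guard (fun kv => decide (PySem.Str.len kv.1 ≤ 4)),
      pvM_guard (fun kv => decide (5 ≤ PySem.Str.len kv.1) && decide (PySem.Str.len kv.1 ≤ 7)),
      pvM_guard (fun kv => decide (8 ≤ PySem.Str.len kv.1)),
      pvFind_guard (fun kv => decide (PySem.Str.len kv.1 ≤ 4)),
      pvFind_guard (fun kv => decide (5 ≤ PySem.Str.len kv.1) && decide (PySem.Str.len kv.1 ≤ 7)),
      pvFind_guard (fun kv => decide (8 ≤ PySem.Str.len kv.1)),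
      pvFilter_med, pvFilter_large]
  have hs : (fun kv : String × Int => decide (PySem.Str.len kv.1 ≤ 4)) = pvSmall := by
    funext kv; simp [pvSmall]
  rw [hs]
  rw [pvWord _ "most occurring small", pvWord _ "most occurring medium",
      pvWord _ "most occurring large", pvCount _ "most occurring small",
      pvCount _ "most occurring medium", pvCount _ "most occurring large"]
  rfl
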